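-- pv_equiv track=rewrite | github.com/jonpang1/Advent-of-Code | 2023/Day-7/camel_cards.py | compare_hands_2
-- ===== SOURCE A (Python) =====
-- def compare_hands_2(hand1, hand2):
--     card_values = {"A": 14, "K": 13, "Q": 12, "J": 0, "T": 10, "9": 9, "8": 8, "7": 7, "6": 6, "5": 5, "4": 4, "3": 3, "2": 2, "1": 1}
--     for i, char in enumerate(hand1):
--         if card_values[char] > card_values[hand2[i]]:
--             return False
--         elif card_values[char] < card_values[hand2[i]]:
--             return True
--         else:
--             continue
-- ===== SOURCE B (Python) =====
-- def compare_hands_2(hand1, hand2):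
--     card_values = {"A": 14, "K": 13, "Q": 12, "J": 0, "T": 10, "9": 9, "8": 8, "7": 7, "6": 6, "5": 5, "4": 4, "3": 3, "2": 2, "1": 1}
--     # Encode each hand (over hand1's positions) as one base-15 integer; card values are
--     # digits 0..14, so comparing the two integers once is exactly the positional verdict.
--     k1 = 0
--     for c in hand1:
--         k1 = k1 * 15 + card_values[c]
--     k2 = 0
--     for i in range(len(hand1)):
--         k2 = k2 * 15 + card_values[hand2[i]]
--     if k1 < k2:
--         return True
--     elif k1 > k2:
--         return False
-- ===== Notes on version B (the rewrite author's own statement) =====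
-- stated objective: alternative
-- what changed: Replaces the card-by-card early-return comparison scan with a base-15 positional encoding: each hand is folded into a single integer key (card values are digits 0..14) and the verdict is one integer comparison of the two keys.
-- outside the precondition, e.g. on compare_hands_2('2A', '3'): A returns True, B raises IndexError; on compare_hands_2('2x', '3y'): A returns True, B raises KeyError
import Mathlib
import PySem

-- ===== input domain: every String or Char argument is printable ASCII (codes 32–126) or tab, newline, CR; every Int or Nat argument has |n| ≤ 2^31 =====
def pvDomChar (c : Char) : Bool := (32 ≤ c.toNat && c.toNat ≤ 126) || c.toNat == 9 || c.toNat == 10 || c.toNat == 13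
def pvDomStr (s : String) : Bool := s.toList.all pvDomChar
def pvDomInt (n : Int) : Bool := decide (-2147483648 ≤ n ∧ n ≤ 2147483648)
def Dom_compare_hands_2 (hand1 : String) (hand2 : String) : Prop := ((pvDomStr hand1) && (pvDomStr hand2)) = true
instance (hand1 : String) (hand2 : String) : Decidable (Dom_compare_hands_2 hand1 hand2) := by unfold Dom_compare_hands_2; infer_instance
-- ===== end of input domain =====

-- B folds each hand into a single base-15 integer key (card values are the digits) and decides
-- by one integer comparison, instead of A's card-by-card early-return scan (objective: alternative).


-- ===== PORT A =====
-- the card_values dict as a lookup: none = KeyError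
def cardVal (c : Char) : Option Int :=
  if c = 'A' then some 14 else if c = 'K' then some 13 else if c = 'Q' then some 12
  else if c = 'J' then some 0 else if c = 'T' then some 10 else if c = '9' then some 9
  else if c = '8' then some 8 else if c = '7' then some 7 else if c = '6' then some 6
  else if c = '5' then some 5 else if c = '4' then some 4 else if c = '3' then some 3
  else if c = '2' then some 2 else if c = '1' then some 1 else none

-- A's `for i, char in enumerate(hand1)` loop; `none` on the error paths (KeyError / IndexError,
-- excluded by Pre_) as well as for falling off the end (Python's implicit None)
def compareLoopA (h2 : String) : List Char → Nat → Option Bool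
  | [], _ => none
  | c :: cs, i =>
    match cardVal c, (PySem.Str.pyGet? h2 (Int.ofNat i)).bind cardVal with
    | some a, some b =>
      if a > b then some false
      else if a < b then some true
      else compareLoopA h2 cs (i + 1)
    | _, _ => none

def compare_hands_2 (hand1 : String) (hand2 : String) : Option Bool :=
  compareLoopA hand2 hand1.toList 0

-- ===== PORT B =====
-- B's first loop: `for c in hand1: k1 = k1 * 15 + card_values[c]` (none = KeyError)
def keyChars : List Char → Int → Option Int
  | [], k => some k
  | c :: cs, k =>
    match cardVal c with
    | some v => keyChars cs (k * 15 + v)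
    | none => none

-- B's second loop: `for i in range(len(hand1)): k2 = k2 * 15 + card_values[hand2[i]]`
-- (none = IndexError / KeyError)
def keyIdx (h2 : String) : List Nat → Int → Option Int
  | [], k => some k
  | i :: is, k =>
    match (PySem.Str.pyGet? h2 (Int.ofNat i)).bind cardVal with
    | some v => keyIdx h2 is (k * 15 + v)
    | none => none

def compare_hands_2_alt (hand1 : String) (hand2 : String) : Option Bool :=
  match keyChars hand1.toList 0, keyIdx hand2 (List.range hand1.toList.length) 0 with
  | some k1, some k2 =>
    if k1 < k2 then some true
    else if k2 < k1 then some false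
    else none
  | _, _ => none

-- ===== PRECONDITION & SPEC =====
def isCard (c : Char) : Bool :=
  c ∈ (['A', 'K', 'Q', 'J', 'T', '9', '8', '7', '6', '5', '4', '3', '2', '1'] : List Char)

-- Pre_ excludes inputs on which A raises KeyError/IndexError, and also inputs on which A decides
-- at an early column while a later position below hand1's length holds a non-card character or
-- lies past hand2's end: B reads all of hand1's positions up front, so B raises there where A
-- returns early.
def Pre_compare_hands_2 (hand1 : String) (hand2 : String) : Prop :=
  hand1.toList.length ≤ hand2.toList.length ∧
  hand1.toList.all isCard = true ∧
  (hand2.toList.take hand1.toList.length).all isCard = true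

instance (hand1 : String) (hand2 : String) : Decidable (Pre_compare_hands_2 hand1 hand2) := by
  unfold Pre_compare_hands_2; infer_instance

def pvWitness_compare_hands_2 : String × String := ("32T3K", "T55J5")

def Spec_compare_hands_2 (hand1 : String) (hand2 : String) (out : Option Bool) : Prop := out = compare_hands_2_alt hand1 hand2
instance (hand1 : String) (hand2 : String) (out : Option Bool) : Decidable (Spec_compare_hands_2 hand1 hand2 out) := by unfold Spec_compare_hands_2; infer_instance

-- ===== CLAIM (what is proved, stated in full; the proofs are below) =====
def Claim_equal_compare_hands_2 : Prop := ∀ (hand1 : String) (hand2 : String), Dom_compare_hands_2 hand1 hand2 → Pre_compare_hands_2 hand1 hand2 → Spec_compare_hands_2 hand1 hand2 (compare_hands_2 hand1 hand2)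

-- ===== LEMMAS AND PROOFS =====

theorem isCard_iff (c : Char) : isCard c = true ↔ (cardVal c).isSome := by
  constructor
  · intro h
    simp only [isCard, List.mem_cons, List.not_mem_nil, or_false, decide_eq_true_eq] at h
    rcases h with rfl|rfl|rfl|rfl|rfl|rfl|rfl|rfl|rfl|rfl|rfl|rfl|rfl|rfl <;> rfl
  · intro h
    by_contra hn
    simp only [isCard, List.mem_cons, List.not_mem_nil, or_false, decide_eq_true_eq,
      not_or] at hn
    obtain ⟨h1, h2, h3, h4, h5, h6, h7, h8, h9, h10, h11, h12, h13, h14⟩ := hn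
    rw [cardVal, if_neg h1, if_neg h2, if_neg h3, if_neg h4, if_neg h5, if_neg h6, if_neg h7,
      if_neg h8, if_neg h9, if_neg h10, if_neg h11, if_neg h12, if_neg h13, if_neg h14] at h
    exact absurd h (by simp)

def valOf (c : Char) : Int := (cardVal c).getD 0

theorem valOf_bounds (c : Char) (h : isCard c = true) : 0 ≤ valOf c ∧ valOf c < 15 := by
  simp only [isCard, List.mem_cons, List.not_mem_nil, or_false, decide_eq_true_eq] at h
  rcases h with rfl|rfl|rfl|rfl|rfl|rfl|rfl|rfl|rfl|rfl|rfl|rfl|rfl|rfl <;> decide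

-- Python's lexicographic ordering of the two value lists (characterizes A's loop)
def lexCmp : List Int → List Int → Ordering
  | [], [] => .eq
  | [], _ :: _ => .lt
  | _ :: _, [] => .gt
  | a :: as_, b :: bs => if a < b then .lt else if b < a then .gt else lexCmp as_ bs

-- the pure base-15 fold (characterizes B's loops)
def keyFold : List Int → Int → Int
  | [], k => k
  | d :: ds, k => keyFold ds (k * 15 + d)

theorem keyFold_shift (ds : List Int) (k : Int) :
    keyFold ds k = k * 15 ^ ds.length + keyFold ds 0 := by
  induction ds generalizing k with
  | nil => simp [keyFold]
  | cons d ds ih =>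
    simp only [keyFold, List.length_cons]
    rw [ih (k * 15 + d), ih (0 * 15 + d)]
    ring

theorem keyFold_bounds (ds : List Int) (h : ∀ d ∈ ds, 0 ≤ d ∧ d < 15) :
    0 ≤ keyFold ds 0 ∧ keyFold ds 0 < 15 ^ ds.length := by
  induction ds with
  | nil => simp [keyFold]
  | cons d ds ih =>
    obtain ⟨hd0, hd15⟩ := h d (by simp)
    obtain ⟨h0, h15⟩ := ih (fun e he => h e (by simp [he]))
    simp only [keyFold, List.length_cons]
    rw [keyFold_shift]
    have hp : (0:Int) < 15 ^ ds.length := pow_pos (by norm_num) _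
    have h14 : d * 15 ^ ds.length ≤ 14 * 15 ^ ds.length := by nlinarith
    have hs : (15:Int) ^ (ds.length + 1) = 15 ^ ds.length * 15 := pow_succ _ _
    constructor
    · nlinarith [mul_nonneg hd0 hp.le]
    · nlinarith

-- base-15 keys compare exactly as the digit lists compare lexicographically
theorem keyFold_lex (ds1 ds2 : List Int) (hlen : ds1.length = ds2.length)
    (h1 : ∀ d ∈ ds1, 0 ≤ d ∧ d < 15) (h2 : ∀ d ∈ ds2, 0 ≤ d ∧ d < 15) (k : Int) :
    (keyFold ds1 k < keyFold ds2 k ↔ lexCmp ds1 ds2 = .lt) ∧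
    (keyFold ds1 k = keyFold ds2 k ↔ lexCmp ds1 ds2 = .eq) := by
  induction ds1 generalizing ds2 k with
  | nil =>
    cases ds2 with
    | nil => simp [keyFold, lexCmp]
    | cons b bs => simp at hlen
  | cons a as ih =>
    cases ds2 with
    | nil => simp at hlen
    | cons b bs =>
      have hlen' : as.length = bs.length := by simpa using hlen
      have ha := h1 a (by simp)
      have hb := h2 b (by simp)
      have has : ∀ d ∈ as, 0 ≤ d ∧ d < 15 := fun d hd => h1 d (by simp [hd])
      have hbs : ∀ d ∈ bs, 0 ≤ d ∧ d < 15 := fun d hd => h2 d (by simp [hd])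
      simp only [keyFold, lexCmp]
      by_cases hab : a < b
      · -- strictly smaller first digit: the whole key is smaller
        have hlt : keyFold as (k * 15 + a) < keyFold bs (k * 15 + b) := by
          rw [keyFold_shift as, keyFold_shift bs, hlen']
          obtain ⟨hr1l, hr1u⟩ := keyFold_bounds as has
          obtain ⟨hr2l, hr2u⟩ := keyFold_bounds bs hbs
          rw [hlen'] at hr1u
          have hp : (0:Int) < 15 ^ bs.length := pow_pos (by norm_num) _
          nlinarith
        simp [hab, hlt, ne_of_lt hlt]
      · by_cases hba : b < a
        · have hlt : keyFold bs (k * 15 + b) < keyFold as (k * 15 + a) := by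
            rw [keyFold_shift as, keyFold_shift bs, hlen']
            obtain ⟨hr1l, hr1u⟩ := keyFold_bounds as has
            obtain ⟨hr2l, hr2u⟩ := keyFold_bounds bs hbs
            have hp : (0:Int) < 15 ^ bs.length := pow_pos (by norm_num) _
            nlinarith
          simp [hab, hba, not_lt_of_gt hlt, ne_of_gt hlt]
        · have : a = b := le_antisymm (not_lt.mp hba) (not_lt.mp hab)
          subst this
          simpa [hab] using ih bs hlen' has hbs (k * 15 + a)

theorem loopA_eq (h2 : String) (cs : List Char) (i : Nat)
    (hv1 : ∀ c ∈ cs, (cardVal c).isSome)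
    (hlen : i + cs.length ≤ h2.toList.length)
    (hv2 : ∀ c ∈ (h2.toList.drop i).take cs.length, (cardVal c).isSome) :
    compareLoopA h2 cs i =
      match lexCmp (cs.map valOf) (((h2.toList.drop i).take cs.length).map valOf) with
      | .lt => some true
      | .gt => some false
      | .eq => none := by
  induction cs generalizing i with
  | nil => simp [compareLoopA, lexCmp]
  | cons c cs ih =>
    have hi : i < h2.toList.length := by simp only [List.length_cons] at hlen; omega
    have hdrop : h2.toList.drop i = h2.toList[i] :: h2.toList.drop (i + 1) :=
      (List.getElem_cons_drop hi).symm
    have hget : PySem.Str.pyGet? h2 (Int.ofNat i) = some h2.toList[i] := by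
      simp [PySem.Str.pyGet?, PySem.List.pyGet?_natCast, List.getElem?_eq_getElem hi]
    obtain ⟨a, ha⟩ := Option.isSome_iff_exists.mp (hv1 c (by simp))
    have hb : (cardVal h2.toList[i]).isSome := by
      apply hv2
      rw [List.length_cons, hdrop, List.take_succ_cons]
      exact List.mem_cons_self
    obtain ⟨b, hbv⟩ := Option.isSome_iff_exists.mp hb
    have hvals : ((h2.toList.drop i).take (c :: cs).length).map valOf
        = valOf h2.toList[i] :: ((h2.toList.drop (i + 1)).take cs.length).map valOf := by
      rw [List.length_cons, hdrop, List.take_succ_cons, List.map_cons]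
    rw [hvals]
    simp only [compareLoopA, hget, Option.bind_some, ha, hbv, List.map_cons]
    have hva : valOf c = a := by simp [valOf, ha]
    have hvb : valOf h2.toList[i] = b := by simp [valOf, hbv]
    rw [hva, hvb]
    by_cases hab : a > b
    · simp [hab, lexCmp, show ¬ a < b by omega]
    · by_cases hab2 : a < b
      · simp [hab, hab2, lexCmp]
      · have heq : a = b := by omega
        simp only [if_neg hab, if_neg hab2]
        rw [ih (i + 1) (fun d hd => hv1 d (by simp [hd]))
          (by simp only [List.length_cons] at hlen; omega)
          (fun d hd => hv2 d (by
            rw [List.length_cons, hdrop, List.take_succ_cons]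
            exact List.mem_cons_of_mem _ hd))]
        simp [lexCmp, heq]

theorem keyChars_eq (cs : List Char) (k : Int) (h : ∀ c ∈ cs, (cardVal c).isSome) :
    keyChars cs k = some (keyFold (cs.map valOf) k) := by
  induction cs generalizing k with
  | nil => rfl
  | cons c cs ih =>
    obtain ⟨a, ha⟩ := Option.isSome_iff_exists.mp (h c (by simp))
    have hva : valOf c = a := by simp [valOf, ha]
    simp [keyChars, ha, keyFold, hva, ih _ (fun d hd => h d (by simp [hd]))]

theorem keyIdx_eq (h2 : String) (is : List Nat) (k : Int)
    (h : ∀ i ∈ is, i < h2.toList.length ∧ (cardVal (h2.toList.getD i ' ')).isSome) :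
    keyIdx h2 is k = some (keyFold (is.map (fun i => valOf (h2.toList.getD i ' '))) k) := by
  induction is generalizing k with
  | nil => rfl
  | cons i is ih =>
    obtain ⟨hi, hv⟩ := h i (by simp)
    have hget : PySem.Str.pyGet? h2 (Int.ofNat i) = some h2.toList[i] := by
      simp [PySem.Str.pyGet?, PySem.List.pyGet?_natCast, List.getElem?_eq_getElem hi]
    have hgd : h2.toList.getD i ' ' = h2.toList[i] := List.getD_eq_getElem _ _ hi
    rw [hgd] at hv
    obtain ⟨b, hbv⟩ := Option.isSome_iff_exists.mp hv
    have hvb : valOf (h2.toList.getD i ' ') = b := by rw [hgd]; simp [valOf, hbv]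
    rw [List.map_cons, hvb]
    simp only [keyIdx, hget, Option.bind_some, hbv, keyFold]
    exact ih _ (fun j hj => h j (by simp [hj]))

theorem range_map_eq_take (h2 : String) (n : Nat) (hn : n ≤ h2.toList.length) :
    (List.range n).map (fun i => valOf (h2.toList.getD i ' '))
      = (h2.toList.take n).map valOf := by
  apply List.ext_getElem
  · simp only [List.length_map, List.length_range, List.length_take]; omega
  · intro j hj1 hj2
    simp only [List.getElem_map, List.getElem_range, List.getElem_take]
    have : j < h2.toList.length := by simp at hj2; omega
    rw [List.getD_eq_getElem _ _ this]

-- ===== VERDICT (by name: the statement is the Claim_ definition above) =====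
theorem compare_hands_2_spec : Claim_equal_compare_hands_2 := by
  intro hand1 hand2 _ hpre
  obtain ⟨hlen, hv1', hv2'⟩ := hpre
  have hv1 : ∀ c ∈ hand1.toList, (cardVal c).isSome :=
    fun c hc => (isCard_iff c).mp (List.all_eq_true.mp hv1' c hc)
  have hv2 : ∀ c ∈ hand2.toList.take hand1.toList.length, (cardVal c).isSome :=
    fun c hc => (isCard_iff c).mp (List.all_eq_true.mp hv2' c hc)
  unfold Spec_compare_hands_2 compare_hands_2 compare_hands_2_alt
  rw [keyChars_eq _ _ hv1]
  rw [keyIdx_eq hand2 _ _ (by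
    intro i hi
    have hi' : i < hand2.toList.length := by
      have := List.mem_range.mp hi; omega
    refine ⟨hi', ?_⟩
    rw [List.getD_eq_getElem _ _ hi']
    apply hv2
    rw [List.mem_take_iff_getElem]
    exact ⟨i, by have := List.mem_range.mp hi; omega, by simp⟩)]
  rw [range_map_eq_take hand2 _ hlen]
  rw [loopA_eq hand2 hand1.toList 0 hv1 (by omega) (by simpa using hv2)]
  rw [List.drop_zero]
  set v1 := hand1.toList.map valOf with hv1d
  set v2 := (hand2.toList.take hand1.toList.length).map valOf with hv2d
  have hb1 : ∀ d ∈ v1, 0 ≤ d ∧ d < 15 := by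
    intro d hd
    obtain ⟨c, hc, rfl⟩ := List.mem_map.mp hd
    exact valOf_bounds c (List.all_eq_true.mp hv1' c hc)
  have hb2 : ∀ d ∈ v2, 0 ≤ d ∧ d < 15 := by
    intro d hd
    obtain ⟨c, hc, rfl⟩ := List.mem_map.mp hd
    exact valOf_bounds c (List.all_eq_true.mp hv2' c hc)
  have hlen' : v1.length = v2.length := by
    rw [hv1d, hv2d]
    simp only [List.length_map, List.length_take]; omega
  obtain ⟨hltiff, heqiff⟩ := keyFold_lex v1 v2 hlen' hb1 hb2 0
  rcases hcmp : lexCmp v1 v2 with _ | _ | _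
  · simp [hltiff.mpr hcmp]
  · simp [heqiff.mpr hcmp]
  · have hne : ¬ keyFold v1 0 < keyFold v2 0 := by
      intro h
      rw [hltiff] at h
      rw [h] at hcmp
      exact Ordering.noConfusion hcmp
    have hgt : keyFold v2 0 < keyFold v1 0 := by
      rcases lt_trichotomy (keyFold v1 0) (keyFold v2 0) with h | h | h
      · exact absurd h hne
      · rw [heqiff] at h
        rw [h] at hcmp
        exact Ordering.noConfusion hcmp
      · exact h
    simp [hne, hgt]
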